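-- pv_equiv track=rewrite | github.com/mjjungg/TIL | Algorithm/Programmers/Lv2/과제 진행하기.py | solution
-- ===== SOURCE A (Python) =====
-- from collections import deque
--
-- def time_diff(t1, t2):
--     h1 = int(t1.split(":")[0])
--     m1 = int(t1.split(":")[1])
--
--     h2 = int(t2.split(":")[0])
--     m2 = int(t2.split(":")[1])
--
--     return (h2 * 60 + m2)  - (h1 * 60 + m1)
--
-- def solution(plans):
--     answer = []
--     rest = deque()
--     plans.sort(key=lambda x:x[1])
--
--     for i in range(len(plans)-1):
--         name, start, play = plans[i]
--         nxt_name, nxt_start, nxt_play = plans[i+1]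
--         d = time_diff(start, nxt_start)
--
--         if int(play) <= d:
--             answer.append(name)
--             d -= int(play)
--
--             while 0 < d and rest:
--                 n, r = rest[0]
--
--                 if 0 <= d - r:
--                     rest.popleft()
--                     d -= r
--                     answer.append(n)
--                 else:
--                     rest[0][1] -= d
--                     break
--         else:
--             rest.appendleft([name, int(play)-d])
--
--     answer.append(plans[-1][0])
--     for n, s in rest:
--         answer.append(n)
--
--
--     return answer
-- ===== SOURCE B (Python) =====
-- def solution(plans):
--     plans.sort(key=lambda x: x[1])
--
--     def mins(t):
--         return int(t.split(":")[0]) * 60 + int(t.split(":")[1])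
--
--     answer = []
--     stack = []  # (name, threshold): the entry is finished once D reaches its threshold
--     D = 0       # free minutes elapsed so far minus total work pushed so far
--     for i, p in enumerate(plans):
--         if i:
--             D += mins(p[1]) - mins(plans[i - 1][1])
--         while stack and stack[-1][1] <= D:
--             answer.append(stack.pop()[0])
--         stack.append((p[0], D))
--         if i < len(plans) - 1:
--             D -= int(p[2])
--     while stack:
--         answer.append(stack.pop()[0])
--     return answer
-- ===== Notes on version B (the rewrite author's own statement) =====
-- stated objective: alternative
-- what changed: Replaces A's finish-or-pause pair-lookahead with a mutable deque of remaining times by an immutable threshold stack driven by one global counter D (free minutes minus pushed work): every task is pushed as (name, D), an entry finishes exactly when D climbs back to its threshold, so A's per-entry decrements and budget threading disappear into a single pop-while comparison.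
import Mathlib
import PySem

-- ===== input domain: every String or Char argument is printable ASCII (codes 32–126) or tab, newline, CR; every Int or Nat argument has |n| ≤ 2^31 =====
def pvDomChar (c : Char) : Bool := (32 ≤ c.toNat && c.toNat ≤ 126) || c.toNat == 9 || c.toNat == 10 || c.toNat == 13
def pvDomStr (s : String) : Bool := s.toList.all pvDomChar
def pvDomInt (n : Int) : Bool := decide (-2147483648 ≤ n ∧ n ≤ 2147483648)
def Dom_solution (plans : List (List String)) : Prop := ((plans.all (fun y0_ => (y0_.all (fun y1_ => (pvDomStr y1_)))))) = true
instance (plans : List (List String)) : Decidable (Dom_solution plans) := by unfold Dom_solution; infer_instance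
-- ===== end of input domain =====

-- B replaces A's finish/pause branching over a deque of mutable remaining times by an immutable
-- threshold stack driven by one global counter D (free minutes minus pushed work): a task is pushed
-- as (name, D) and finishes exactly when D climbs back to its threshold — same cost, no per-entry
-- arithmetic. Both A and B sort `plans` in place (the same stable sort by plans[1]); the equivalence
-- proved here is about the return value.

-- ===== PORT A =====

-- int(s); Pre_solution guarantees the parse succeeds (ofStr? = some), so the default is never used
def pvIntA (s : String) : Int := (PySem.Int.ofStr? s).getD 0

-- helper time_diff of A; Pre_solution guarantees split(":") has ≥ 2 pieces and both parse
def time_diff (t1 t2 : String) : Int :=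
  let h1 := pvIntA (PySem.List.pyGetD ((PySem.Str.split? t1 ":").getD []) 0 "")
  let m1 := pvIntA (PySem.List.pyGetD ((PySem.Str.split? t1 ":").getD []) 1 "")
  let h2 := pvIntA (PySem.List.pyGetD ((PySem.Str.split? t2 ":").getD []) 0 "")
  let m2 := pvIntA (PySem.List.pyGetD ((PySem.Str.split? t2 ":").getD []) 1 "")
  (h2 * 60 + m2) - (h1 * 60 + m1)

-- A's inner `while 0 < d and rest:` loop over the deque `rest` (front = index 0)
def drainA : Int → List (String × Int) → List String × List (String × Int)
  | _, [] => ([], [])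
  | d, (n, r) :: tl =>
    if 0 < d then
      if 0 ≤ d - r then
        let pr := drainA (d - r) tl
        (n :: pr.1, pr.2)
      else ([], (n, r - d) :: tl)
    else ([], (n, r) :: tl)

-- A's `for i in range(len(plans)-1)` loop: consecutive pairs plans[i], plans[i+1]
def loopA : List String → List (String × Int) → List (List String) → List String × List (String × Int)
  | ans, rest, p :: q :: tl =>
    let name := PySem.List.pyGetD p 0 ""
    let play := pvIntA (PySem.List.pyGetD p 2 "")
    let d := time_diff (PySem.List.pyGetD p 1 "") (PySem.List.pyGetD q 1 "")
    if play ≤ d then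
      let pr := drainA (d - play) rest
      loopA (ans ++ [name] ++ pr.1) pr.2 (q :: tl)
    else
      loopA ans ((name, play - d) :: rest) (q :: tl)
  | ans, rest, _ => (ans, rest)

def solution (plans : List (List String)) : List String :=
  let ps := PySem.List.sorted plans (key := fun x => PySem.List.pyGetD x 1 "")
  let pr := loopA [] [] ps
  -- answer.append(plans[-1][0]); Pre_solution guarantees plans ≠ [] (IndexError otherwise)
  pr.1 ++ [PySem.List.pyGetD (PySem.List.pyGetD ps (-1) []) 0 ""] ++ pr.2.map Prod.fst

-- ===== PORT B =====

-- int(s); Pre_solution guarantees the parse succeeds where B evaluates it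
def pvIntB (s : String) : Int := (PySem.Int.ofStr? s).getD 0

-- B's helper mins(t) = int(t.split(":")[0]) * 60 + int(t.split(":")[1]); split? is some (sep ≠ "")
def startMin (s : String) : Int :=
  pvIntB (PySem.List.pyGetD ((PySem.Str.split? s ":").getD []) 0 "") * 60 +
  pvIntB (PySem.List.pyGetD ((PySem.Str.split? s ":").getD []) 1 "")

-- B's `while stack and stack[-1][1] <= D:` pop loop (stack top = list head; entries never mutated)
def popWhile (D : Int) : List (String × Int) → List String × List (String × Int)
  | [] => ([], [])
  | (n, c) :: st => if c ≤ D then let pr := popWhile D st; (n :: pr.1, pr.2) else ([], (n, c) :: st)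

-- B's `for i, p in enumerate(plans):` loop; `prev` = some previous plan (`if i:`), counter D threaded;
-- the `| none` base is the final `while stack:` drain (stack popped LIFO = head first)
def loopB (ans : List String) (st : List (String × Int)) (D : Int) (prev : Option (List String)) :
    List (List String) → List String
  | [] => ans ++ st.map Prod.fst
  | p :: tl =>
    let D1 := match prev with
      | none => D
      | some pv => D + (startMin (PySem.List.pyGetD p 1 "") - startMin (PySem.List.pyGetD pv 1 ""))
    let pr := popWhile D1 st
    let st2 := (PySem.List.pyGetD p 0 "", D1) :: pr.2
    -- `if i < len(plans) - 1: D -= int(p[2])` — the last plan's play is never parsed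
    let D2 := if tl = [] then D1 else D1 - pvIntB (PySem.List.pyGetD p 2 "")
    loopB (ans ++ pr.1) st2 D2 (some p) tl

def solution_alt (plans : List (List String)) : List String :=
  let ps := PySem.List.sorted plans (key := fun x => PySem.List.pyGetD x 1 "")
  loopB [] [] 0 none ps

-- ===== PRECONDITION & SPEC =====

def ParsesInt (s : String) : Prop := (PySem.Int.ofStr? s).isSome
def ValidStart (s : String) : Prop :=
  2 ≤ ((PySem.Str.split? s ":").getD []).length ∧
  ParsesInt (((PySem.Str.split? s ":").getD []).getD 0 "") ∧ ParsesInt (((PySem.Str.split? s ":").getD []).getD 1 "")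

-- Python's string order, kernel-decidably: the sort key as a Char list (Lean's String.lt is not
-- kernel-reducible; List Char lex order is the same order)
def startKey (p : List String) : List Char := (PySem.List.pyGetD p 1 "").toList

-- Pre_ = exactly the inputs A returns on: plans nonempty (else IndexError at plans[-1]); a single
-- plan only needs a sort key (length ≥ 2); with ≥ 2 plans every entry must be an exact triple with a
-- parseable "H:M" start (unpacking / split indexing / int() raise otherwise), and every play must
-- parse EXCEPT the last plan in sorted order (A never reads that one) — "not sorted-last" stated by
-- indices: some later entry has a ≥ key, or some entry has a strictly greater key.
def Pre_solution (plans : List (List String)) : Prop :=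
  plans ≠ [] ∧
  (plans.length = 1 → ∀ p ∈ plans, 2 ≤ p.length) ∧
  (2 ≤ plans.length →
    (∀ p ∈ plans, p.length = 3 ∧ ValidStart (p.getD 1 "")) ∧
    ∀ i < plans.length,
      ((∃ j < plans.length, i < j ∧ startKey (plans.getD i []) ≤ startKey (plans.getD j [])) ∨
       (∃ j < plans.length, startKey (plans.getD i []) < startKey (plans.getD j []))) →
      ParsesInt ((plans.getD i []).getD 2 ""))
instance (plans : List (List String)) : Decidable (Pre_solution plans) := by
  unfold Pre_solution ValidStart ParsesInt startKey; infer_instance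

def pvWitness_solution : List (List String) :=
  [["b", "0:30", "20"], ["a", "0:1", "5"], ["c", "1:5", "1"]]

def Spec_solution (plans : List (List String)) (out : List String) : Prop := out = solution_alt plans
instance (plans : List (List String)) (out : List String) : Decidable (Spec_solution plans out) := by
  unfold Spec_solution; infer_instance

-- ===== CLAIM (what is proved, stated in full; the proofs are below) =====
def Claim_equal_solution : Prop :=
  ∀ (plans : List (List String)), Dom_solution plans → Pre_solution plans →
    Spec_solution plans (solution plans)

-- ===== LEMMAS AND PROOFS =====

-- proof-side bridge: A's deque of remaining times rendered in B's coordinates — entry k's threshold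
-- is D plus the cumulative remaining time of entries 1..k
def thr (D : Int) : List (String × Int) → List (String × Int)
  | [] => []
  | (n, r) :: st => (n, D + r) :: thr (D + r) st

theorem pvInt_eq : pvIntA = pvIntB := rfl

theorem time_diff_eq (t1 t2 : String) : time_diff t1 t2 = startMin t2 - startMin t1 := by
  simp only [time_diff, startMin, pvInt_eq]

-- one-step unfoldings of B's loop (rw with these once per step keeps the recursion controlled)
theorem loopB_nil (ans : List String) (st : List (String × Int)) (D : Int)
    (prev : Option (List String)) : loopB ans st D prev [] = ans ++ st.map Prod.fst := rfl

theorem loopB_cons_none (ans : List String) (st : List (String × Int)) (D : Int)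
    (p : List String) (tl : List (List String)) :
    loopB ans st D none (p :: tl) =
      loopB (ans ++ (popWhile D st).1)
        ((PySem.List.pyGetD p 0 "", D) :: (popWhile D st).2)
        (if tl = [] then D else D - pvIntB (PySem.List.pyGetD p 2 ""))
        (some p) tl := rfl

theorem loopB_cons_some (ans : List String) (st : List (String × Int)) (D : Int)
    (pv p : List String) (tl : List (List String)) :
    loopB ans st D (some pv) (p :: tl) =
      loopB
        (ans ++ (popWhile (D + (startMin (PySem.List.pyGetD p 1 "") -
            startMin (PySem.List.pyGetD pv 1 ""))) st).1)
        ((PySem.List.pyGetD p 0 "",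
            D + (startMin (PySem.List.pyGetD p 1 "") - startMin (PySem.List.pyGetD pv 1 ""))) ::
          (popWhile (D + (startMin (PySem.List.pyGetD p 1 "") -
            startMin (PySem.List.pyGetD pv 1 ""))) st).2)
        (if tl = [] then
            D + (startMin (PySem.List.pyGetD p 1 "") - startMin (PySem.List.pyGetD pv 1 ""))
          else
            D + (startMin (PySem.List.pyGetD p 1 "") - startMin (PySem.List.pyGetD pv 1 "")) -
              pvIntB (PySem.List.pyGetD p 2 ""))
        (some p) tl := rfl

theorem thr_map_fst (D : Int) (st : List (String × Int)) :
    (thr D st).map Prod.fst = st.map Prod.fst := by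
  induction st generalizing D with
  | nil => rfl
  | cons h t ih => obtain ⟨n, r⟩ := h; simp [thr, ih]

-- A's drain leaves only positive remainders on the deque
theorem drainA_allpos (d : Int) (rest : List (String × Int)) (h : ∀ x ∈ rest, 0 < x.2) :
    ∀ x ∈ (drainA d rest).2, 0 < x.2 := by
  induction rest generalizing d with
  | nil => simp [drainA]
  | cons hd tl ih =>
    obtain ⟨n, r⟩ := hd
    have hr : 0 < r := h (n, r) (by simp)
    have htl : ∀ x ∈ tl, 0 < x.2 := fun x hx => h x (by simp [hx])
    simp only [drainA]
    split_ifs with h1 h2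
    · exact ih (d - r) htl
    · intro x hx
      rcases List.mem_cons.mp hx with rfl | hx
      · simpa using by omega
      · exact htl x hx
    · intro x hx
      rcases List.mem_cons.mp hx with rfl | hx
      · simpa using hr
      · exact htl x hx

-- the key coordinate change: with a nonnegative budget b and positive remainders, B's pop-while at
-- level D + b on the threshold picture of `rest` pops exactly the names A's drain pops, and the
-- survivors' threshold picture is untouched (A's decrement of the top is a no-op in thresholds)
theorem popWhile_thr (b : Int) (rest : List (String × Int)) (D : Int) (hb : 0 ≤ b)
    (h : ∀ x ∈ rest, 0 < x.2) :
    popWhile (D + b) (thr D rest) = ((drainA b rest).1, thr (D + b) (drainA b rest).2) := by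
  induction rest generalizing b D with
  | nil => simp [drainA, thr, popWhile]
  | cons hd tl ih =>
    obtain ⟨n, r⟩ := hd
    have hr : 0 < r := h (n, r) (by simp)
    have htl : ∀ x ∈ tl, 0 < x.2 := fun x hx => h x (by simp [hx])
    simp only [thr, drainA, popWhile]
    by_cases hrb : r ≤ b
    · rw [if_pos (by omega : D + r ≤ D + b), if_pos (by omega : (0:Int) < b),
        if_pos (by omega : (0:Int) ≤ b - r)]
      have := ih (b - r) (D + r) (by omega) htl
      rw [show D + r + (b - r) = D + b by ring] at this
      rw [this]
    · rw [if_neg (by omega : ¬ D + r ≤ D + b)]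
      by_cases h0 : 0 < b
      · rw [if_pos h0, if_neg (by omega : ¬ (0:Int) ≤ b - r)]
        simp only [thr]
        rw [show D + b + (r - b) = D + r by ring]
      · have hb0 : b = 0 := by omega
        subst hb0
        rw [if_neg h0]
        simp [thr]

-- A's final assembly from a loop state over a nonempty task list
def afinal (ans : List String) (rest : List (String × Int)) (p : List String)
    (l : List (List String)) : List String :=
  (loopA ans rest (p :: l)).1 ++ [PySem.List.pyGetD ((p :: l).getLast (by simp)) 0 ""] ++
    (loopA ans rest (p :: l)).2.map Prod.fst

-- the central invariant: if B's stack is the threshold picture of (current task's play :: A's deque)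
-- at base D, then B's uniform add-gap/pop-while/push step computes A's branchy step, for the whole
-- remaining task list
theorem loop_eq (tl : List (List String)) :
    ∀ (q p : List String) (ans : List String) (rest : List (String × Int)) (D : Int),
      (∀ x ∈ rest, 0 < x.2) →
      loopB ans (thr D ((PySem.List.pyGetD p 0 "", pvIntA (PySem.List.pyGetD p 2 "")) :: rest)) D
        (some p) (q :: tl) = afinal ans rest p (q :: tl) := by
  induction tl with
  | nil =>
    intro q p ans rest D hrest
    set play := pvIntA (PySem.List.pyGetD p 2 "") with hplay
    set d := time_diff (PySem.List.pyGetD p 1 "") (PySem.List.pyGetD q 1 "") with hd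
    have hD1 : D + (startMin (PySem.List.pyGetD q 1 "") - startMin (PySem.List.pyGetD p 1 "")) =
        D + d := by rw [hd, time_diff_eq]
    rw [loopB_cons_some, hD1, if_pos rfl, loopB_nil]
    simp only [thr]
    by_cases hle : play ≤ d
    · rw [show popWhile (D + d) ((PySem.List.pyGetD p 0 "", D + play) :: thr (D + play) rest) =
          (PySem.List.pyGetD p 0 "" :: (drainA (d - play) rest).1,
            thr (D + d) (drainA (d - play) rest).2) by
        simp only [popWhile, if_pos (by omega : D + play ≤ D + d)]
        have := popWhile_thr (d - play) rest (D + play) (by omega) hrest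
        rw [show D + play + (d - play) = D + d by ring] at this
        rw [this]]
      simp only [afinal, loopA, ← hplay, ← hd, if_pos hle]
      simp [thr_map_fst, List.getLast]
    · rw [show popWhile (D + d) ((PySem.List.pyGetD p 0 "", D + play) :: thr (D + play) rest) =
          ([], (PySem.List.pyGetD p 0 "", D + play) :: thr (D + play) rest) by
        simp only [popWhile]
        rw [if_neg (by omega : ¬ D + play ≤ D + d)]]
      simp only [afinal, loopA, ← hplay, ← hd, if_neg hle]
      simp [thr_map_fst, List.getLast]
  | cons r tl2 ih =>
    intro q p ans rest D hrest
    set play := pvIntA (PySem.List.pyGetD p 2 "") with hplay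
    set d := time_diff (PySem.List.pyGetD p 1 "") (PySem.List.pyGetD q 1 "") with hd
    set playq := pvIntA (PySem.List.pyGetD q 2 "") with hplayq
    have hD1 : D + (startMin (PySem.List.pyGetD q 1 "") - startMin (PySem.List.pyGetD p 1 "")) =
        D + d := by rw [hd, time_diff_eq]
    rw [loopB_cons_some, hD1, if_neg (by simp), ← pvInt_eq, ← hplayq]
    simp only [thr]
    by_cases hle : play ≤ d
    · rw [show popWhile (D + d) ((PySem.List.pyGetD p 0 "", D + play) :: thr (D + play) rest) =
          (PySem.List.pyGetD p 0 "" :: (drainA (d - play) rest).1,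
            thr (D + d) (drainA (d - play) rest).2) by
        simp only [popWhile, if_pos (by omega : D + play ≤ D + d)]
        have := popWhile_thr (d - play) rest (D + play) (by omega) hrest
        rw [show D + play + (d - play) = D + d by ring] at this
        rw [this]]
      have hst : ((PySem.List.pyGetD q 0 "", D + d) ::
            thr (D + d) (drainA (d - play) rest).2 :
              List (String × Int)) =
          thr (D + d - playq) ((PySem.List.pyGetD q 0 "", playq) ::
            (drainA (d - play) rest).2) := by
        simp only [thr]
        rw [show D + d - playq + playq = D + d by ring]
      rw [hst, ih r q (ans ++ (PySem.List.pyGetD p 0 "" :: (drainA (d - play) rest).1))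
        (drainA (d - play) rest).2 (D + d - playq) (drainA_allpos _ _ hrest)]
      simp only [afinal, loopA, ← hplay, ← hd, if_pos hle]
      simp
    · rw [show popWhile (D + d) ((PySem.List.pyGetD p 0 "", D + play) :: thr (D + play) rest) =
          ([], (PySem.List.pyGetD p 0 "", D + play) :: thr (D + play) rest) by
        simp only [popWhile]
        rw [if_neg (by omega : ¬ D + play ≤ D + d)]]
      have hst : ((PySem.List.pyGetD q 0 "", D + d) ::
            (PySem.List.pyGetD p 0 "", D + play) :: thr (D + play) rest :
              List (String × Int)) =
          thr (D + d - playq) ((PySem.List.pyGetD q 0 "", playq) ::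
            (PySem.List.pyGetD p 0 "", play - d) :: rest) := by
        simp only [thr]
        rw [show D + d - playq + playq = D + d by ring,
          show D + d + (play - d) = D + play by ring]
      dsimp only
      rw [List.append_nil, hst, ih r q ans ((PySem.List.pyGetD p 0 "", play - d) :: rest) (D + d - playq)
        (by
          intro x hx
          rcases List.mem_cons.mp hx with rfl | hx
          · show (0:Int) < play - d; omega
          · exact hrest x hx)]
      simp only [afinal, loopA, ← hplay, ← hd, if_neg hle]
      simp
-- pyGetD l (-1) of a nonempty list is its last element
theorem pyGetD_neg_one {α : Type} (l : List α) (d : α) (h : l ≠ []) :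
    PySem.List.pyGetD l (-1) d = l.getLast h := by
  induction l with
  | nil => exact absurd rfl h
  | cons a t ih =>
    cases t with
    | nil => simp [PySem.List.pyGetD, PySem.List.pyGet?, PySem.List.pyIdx?, List.getLast]
    | cons b t2 =>
      have := ih (by simp)
      simp only [PySem.List.pyGetD, PySem.List.pyGet?, PySem.List.pyIdx?] at this ⊢
      simp only [List.length_cons] at this ⊢
      split_ifs with h1 h2 <;> simp_all [List.getLast] <;> try omega

-- sorted never empties a list
theorem sorted_ne_nil (plans : List (List String)) (h : plans ≠ []) :
    PySem.List.sorted plans (key := fun x => PySem.List.pyGetD x 1 "") ≠ [] := by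
  intro hnil
  have := (PySem.List.sorted_perm (xs := plans) (key := fun x => PySem.List.pyGetD x 1 "")
    (rev := false)).length_eq
  rw [hnil] at this
  exact h (List.eq_nil_of_length_eq_zero this.symm)

-- ===== VERDICT (by name: the statement is the Claim_ definition above) =====
theorem solution_spec : Claim_equal_solution := by
  intro plans _ hpre
  show solution plans = solution_alt plans
  unfold solution solution_alt
  have hne := sorted_ne_nil plans hpre.1
  set ps := PySem.List.sorted plans (key := fun x => PySem.List.pyGetD x 1 "") with hps
  clear_value ps
  match ps, hne with
  | [p], _ =>
    rw [loopB_cons_none, if_pos rfl, loopB_nil]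
    simp [loopA, popWhile, pyGetD_neg_one [p] ([] : List String) (by simp), List.getLast]
  | p :: q :: tl, _ =>
    show (loopA [] [] (p :: q :: tl)).1 ++
        [PySem.List.pyGetD (PySem.List.pyGetD (p :: q :: tl) (-1) []) 0 ""] ++
        (loopA [] [] (p :: q :: tl)).2.map Prod.fst =
      loopB [] [] 0 none (p :: q :: tl)
    rw [loopB_cons_none, if_neg (by simp)]
    show _ = loopB [] [(PySem.List.pyGetD p 0 "", 0)]
      (0 - pvIntA (PySem.List.pyGetD p 2 "")) (some p) (q :: tl)
    rw [show ([(PySem.List.pyGetD p 0 "", (0:Int))] : List (String × Int)) =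
        thr (0 - pvIntA (PySem.List.pyGetD p 2 ""))
          [(PySem.List.pyGetD p 0 "", pvIntA (PySem.List.pyGetD p 2 ""))] by
      simp [thr]]
    rw [loop_eq tl q p [] [] (0 - pvIntA (PySem.List.pyGetD p 2 "")) (by simp)]
    simp only [afinal]
    rw [pyGetD_neg_one (p :: q :: tl) ([] : List String) (by simp)]
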